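-- pv_equiv track=rewrite | github.com/Shane360129/DBTraining | traindata_clean__fix_sum_distinct_to_subquery.py | rebuild_query_toks
-- ===== SOURCE A (Python) =====
-- def rebuild_query_toks(query):
--     """Rebuild query_toks from query string."""
--     tokens = []
--     i = 0
--     s = query.strip()
--     while i < len(s):
--         if s[i].isspace():
--             i += 1
--             continue
--         # N'...' pattern
--         if s[i] == 'N' and i + 1 < len(s) and s[i+1] == "'":
--             tokens.append('N')
--             j = i + 2
--             while j < len(s) and s[j] != "'":
--                 j += 1
--             tokens.append(s[i+1:j+1])
--             i = j + 1
--             continue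
--         # String literal
--         if s[i] == "'":
--             j = i + 1
--             while j < len(s) and s[j] != "'":
--                 j += 1
--             tokens.append(s[i:j+1])
--             i = j + 1
--             continue
--         # Single-char punctuation
--         if s[i] in '(),;*':
--             tokens.append(s[i])
--             i += 1
--             continue
--         # Two-char operators
--         if i + 1 < len(s) and s[i:i+2] in ('<=', '>=', '<>'):
--             tokens.append(s[i:i+2])
--             i += 2
--             continue
--         if s[i] in '=<>':
--             tokens.append(s[i])
--             i += 1
--             continue
--         # Word/identifier (including dots for WP_M09.dbo.xxx)
--         j = i
--         while j < len(s) and not s[j].isspace() and s[j] not in "(),;=<>'*":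
--             j += 1
--         if j > i:
--             tokens.append(s[i:j])
--         i = j
--     return tokens
-- ===== SOURCE B (Python) =====
-- def rebuild_query_toks(query):
--     """Rebuild query_toks from query string (single-pass character state machine)."""
--     tokens = []
--     buf = ''          # pending word chars, or string-literal-so-far in string mode
--     in_str = False
--     pend = ''         # pending '<' or '>' awaiting a possible second operator char
--     for c in query.strip():
--         if in_str:
--             buf += c
--             if c == "'":
--                 tokens.append(buf)
--                 buf = ''
--                 in_str = False
--             continue
--         if pend:
--             if (pend == '<' and c in '=>') or (pend == '>' and c == '='):
--                 tokens.append(pend + c)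
--                 pend = ''
--                 continue
--             tokens.append(pend)
--             pend = ''
--         if c == "'":
--             if buf:
--                 tokens.append(buf)
--             buf = c
--             in_str = True
--         elif c.isspace():
--             if buf:
--                 tokens.append(buf)
--                 buf = ''
--         elif c in "(),;*=":
--             if buf:
--                 tokens.append(buf)
--                 buf = ''
--             tokens.append(c)
--         elif c in "<>":
--             if buf:
--                 tokens.append(buf)
--                 buf = ''
--             pend = c
--         else:
--             buf += c
--     if in_str:
--         tokens.append(buf)
--     elif pend:
--         tokens.append(pend)
--     elif buf:
--         tokens.append(buf)
--     return tokens
-- ===== Notes on version B (the rewrite author's own statement) =====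
-- stated objective: alternative
-- what changed: Replaced the index-jumping multi-branch scanner with inner while-loops by a single-pass per-character state machine (word buffer / in-string flag / pending angle-operator); the special case for the national-string prefix disappears because a word already stops at a quote, yielding the identical token pair.
import Mathlib
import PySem

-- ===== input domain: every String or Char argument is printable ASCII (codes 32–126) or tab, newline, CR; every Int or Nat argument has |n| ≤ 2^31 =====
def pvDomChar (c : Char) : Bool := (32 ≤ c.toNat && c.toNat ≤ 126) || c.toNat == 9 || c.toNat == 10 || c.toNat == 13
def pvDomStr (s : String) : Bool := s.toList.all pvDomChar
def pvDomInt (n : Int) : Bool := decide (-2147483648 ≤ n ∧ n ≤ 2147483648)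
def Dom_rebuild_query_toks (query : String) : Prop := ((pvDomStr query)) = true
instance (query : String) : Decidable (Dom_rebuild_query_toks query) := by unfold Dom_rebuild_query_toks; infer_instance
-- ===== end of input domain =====

-- B replaces A's index-jumping scanner (inner while-loops per token) by a single-pass
-- per-character state machine; alternative decomposition, same asymptotic cost.

-- ===== PORT A =====
-- while j < len(s) and s[j] != "'": j += 1
def aScanQuote (s : List Char) (j : Nat) : Nat :=
  if _h : j < s.length then
    if s[j]! ≠ '\'' then aScanQuote s (j + 1) else j
  else j
termination_by s.length - j

theorem le_aScanQuote (s : List Char) (j : Nat) : j ≤ aScanQuote s j := by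
  unfold aScanQuote
  split
  · split
    · exact le_trans (Nat.le_succ j) (le_aScanQuote s (j + 1))
    · exact le_refl j
  · exact le_refl j
termination_by s.length - j

-- membership test s[j] not in "(),;=<>'*" (word-stopping chars)
def aWordStop (c : Char) : Bool :=
  c = '(' || c = ')' || c = ',' || c = ';' || c = '=' || c = '<' || c = '>' || c = '\'' || c = '*'

-- while j < len(s) and not s[j].isspace() and s[j] not in "(),;=<>'*": j += 1
def aScanWord (s : List Char) (j : Nat) : Nat :=
  if _h : j < s.length then
    if ¬ PySem.Chars.isspace s[j]! ∧ ¬ aWordStop s[j]! then aScanWord s (j + 1) else j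
  else j
termination_by s.length - j

theorem le_aScanWord (s : List Char) (j : Nat) : j ≤ aScanWord s j := by
  unfold aScanWord
  split
  · split
    · exact le_trans (Nat.le_succ j) (le_aScanWord s (j + 1))
    · exact le_refl j
  · exact le_refl j
termination_by s.length - j

theorem aScanWord_advance (s : List Char) (i : Nat) (h : i < s.length)
    (h1 : ¬ PySem.Chars.isspace s[i]! = true) (h2 : ¬ aWordStop s[i]! = true) :
    i + 1 ≤ aScanWord s i := by
  unfold aScanWord
  rw [dif_pos h, if_pos ⟨h1, h2⟩]
  exact le_aScanWord s (i + 1)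

-- the main while loop of A; tokens are kept as List Char, turned into String at the end.
-- Python slices s[a:b] here always have 0 ≤ a ≤ b, so s[a:b] = (s.drop a).take (b - a).
def aLoop (s : List Char) (i : Nat) (tokens : List (List Char)) : List (List Char) :=
  if h : i < s.length then
    if hws : PySem.Chars.isspace s[i]! then aLoop s (i + 1) tokens
    else if hN : s[i]! = 'N' ∧ i + 1 < s.length ∧ s[i + 1]! = '\'' then
      -- N'...' pattern
      let j := aScanQuote s (i + 2)
      aLoop s (j + 1) (tokens ++ [['N']] ++ [(s.drop (i + 1)).take (j + 1 - (i + 1))])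
    else if hq : s[i]! = '\'' then
      -- string literal
      let j := aScanQuote s (i + 1)
      aLoop s (j + 1) (tokens ++ [(s.drop i).take (j + 1 - i)])
    else if hp : s[i]! = '(' || s[i]! = ')' || s[i]! = ',' || s[i]! = ';' || s[i]! = '*' then
      aLoop s (i + 1) (tokens ++ [[s[i]!]])
    else if h2 : i + 1 < s.length ∧
        ([s[i]!, s[i + 1]!] = ['<', '='] ∨ [s[i]!, s[i + 1]!] = ['>', '='] ∨
         [s[i]!, s[i + 1]!] = ['<', '>']) then
      aLoop s (i + 2) (tokens ++ [[s[i]!, s[i + 1]!]])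
    else if hop : s[i]! = '=' || s[i]! = '<' || s[i]! = '>' then
      aLoop s (i + 1) (tokens ++ [[s[i]!]])
    else
      let j := aScanWord s i
      aLoop s j (if i < j then tokens ++ [(s.drop i).take (j - i)] else tokens)
  else tokens
termination_by s.length - i
decreasing_by
  · omega
  · have := le_aScanQuote s (i + 2); omega
  · have := le_aScanQuote s (i + 1); omega
  · omega
  · omega
  · omega
  · -- word branch: s[i] is a word char, so aScanWord advances at least once
    have hstop : ¬ aWordStop s[i]! = true := by
      simp only [aWordStop]
      simp_all
    have := aScanWord_advance s i h hws hstop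
    omega

def rebuild_query_toks (query : String) : List String :=
  (aLoop (PySem.Chars.strip query.toList) 0 []).map (fun t => String.ofList t)

-- ===== PORT B =====
inductive BMode where
  | norm : BMode
  | instr : BMode
  | pend : Char → BMode
deriving DecidableEq, Repr

-- if buf: tokens.append(buf); buf = ''
def bFlush (toks : List (List Char)) (buf : List Char) : List (List Char) :=
  if buf = [] then toks else toks ++ [buf]

-- the normal-mode branches of B's loop body (reached directly, or after emitting a pending op)
def bStepNorm (toks : List (List Char)) (buf : List Char) (c : Char) :
    List (List Char) × BMode × List Char :=
  if c = '\'' then (bFlush toks buf, BMode.instr, [c])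
  else if PySem.Chars.isspace c then (bFlush toks buf, BMode.norm, [])
  else if c = '(' || c = ')' || c = ',' || c = ';' || c = '*' || c = '=' then
    (bFlush toks buf ++ [[c]], BMode.norm, [])
  else if c = '<' || c = '>' then (bFlush toks buf, BMode.pend c, [])
  else (toks, BMode.norm, buf ++ [c])

-- one iteration of B's for-loop
def bStep (st : List (List Char) × BMode × List Char) (c : Char) :
    List (List Char) × BMode × List Char :=
  match st with
  | (toks, BMode.instr, buf) =>
      if c = '\'' then (toks ++ [buf ++ [c]], BMode.norm, []) else (toks, BMode.instr, buf ++ [c])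
  | (toks, BMode.pend p, _) =>
      if (p = '<' ∧ (c = '=' ∨ c = '>')) ∨ (p = '>' ∧ c = '=') then
        (toks ++ [[p, c]], BMode.norm, [])
      else bStepNorm (toks ++ [[p]]) [] c
  | (toks, BMode.norm, buf) => bStepNorm toks buf c

-- the trailing flush after the loop
def bFinish (st : List (List Char) × BMode × List Char) : List (List Char) :=
  match st with
  | (toks, BMode.instr, buf) => toks ++ [buf]
  | (toks, BMode.pend p, _) => toks ++ [[p]]
  | (toks, BMode.norm, buf) => bFlush toks buf

def rebuild_query_toks_alt (query : String) : List String :=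
  (bFinish ((PySem.Chars.strip query.toList).foldl bStep ([], BMode.norm, []))).map
    (fun t => String.ofList t)

-- ===== PRECONDITION & SPEC =====
def Spec_rebuild_query_toks (query : String) (out : List String) : Prop := out = rebuild_query_toks_alt query
instance (query : String) (out : List String) : Decidable (Spec_rebuild_query_toks query out) := by unfold Spec_rebuild_query_toks; infer_instance

-- ===== CLAIM (what is proved, stated in full; the proofs are below) =====
def Claim_equal_rebuild_query_toks : Prop := ∀ (query : String), Dom_rebuild_query_toks query → Spec_rebuild_query_toks query (rebuild_query_toks query)

-- ===== LEMMAS AND PROOFS =====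

theorem aScanQuote_le (s : List Char) (j : Nat) (h : j ≤ s.length) :
    aScanQuote s j ≤ s.length := by
  unfold aScanQuote
  split
  · split
    · exact aScanQuote_le s (j + 1) (by omega)
    · exact h
  · exact h
termination_by s.length - j

theorem aScanWord_le (s : List Char) (j : Nat) (h : j ≤ s.length) :
    aScanWord s j ≤ s.length := by
  unfold aScanWord
  split
  · split
    · exact aScanWord_le s (j + 1) (by omega)
    · exact h
  · exact h
termination_by s.length - j


theorem aLoop_of_le (s : List Char) (i : Nat) (toks : List (List Char))
    (h : s.length ≤ i) : aLoop s i toks = toks := by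
  unfold aLoop
  rw [dif_neg (by omega)]

theorem aScanQuote_of_stop (s : List Char) (j : Nat) (h : j < s.length)
    (hq : s[j]! = '\'') : aScanQuote s j = j := by
  unfold aScanQuote
  rw [dif_pos h]
  simp [hq]

theorem aScanQuote_of_cont (s : List Char) (j : Nat) (h : j < s.length)
    (hq : ¬ s[j]! = '\'') : aScanQuote s j = aScanQuote s (j + 1) := by
  conv_lhs => unfold aScanQuote
  rw [dif_pos h, if_pos hq]

theorem aScanQuote_of_nil (s : List Char) (j : Nat) (h : ¬ j < s.length) :
    aScanQuote s j = j := by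
  unfold aScanQuote
  rw [dif_neg h]

theorem aScanWord_of_stop (s : List Char) (j : Nat) (h : j < s.length)
    (hw : ¬ (¬ PySem.Chars.isspace s[j]! = true ∧ ¬ aWordStop s[j]! = true)) :
    aScanWord s j = j := by
  unfold aScanWord
  rw [dif_pos h, if_neg hw]

theorem aScanWord_of_cont (s : List Char) (j : Nat) (h : j < s.length)
    (hw : ¬ PySem.Chars.isspace s[j]! = true ∧ ¬ aWordStop s[j]! = true) :
    aScanWord s j = aScanWord s (j + 1) := by
  conv_lhs => unfold aScanWord
  rw [dif_pos h, if_pos hw]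

theorem aScanWord_of_nil (s : List Char) (j : Nat) (h : ¬ j < s.length) :
    aScanWord s j = j := by
  unfold aScanWord
  rw [dif_neg h]

theorem aScanWord_stop (s : List Char) (i : Nat) (h : aScanWord s i < s.length) :
    PySem.Chars.isspace s[aScanWord s i]! = true ∨ aWordStop s[aScanWord s i]! = true := by
  by_cases hi : i < s.length
  · by_cases hw : ¬ PySem.Chars.isspace s[i]! = true ∧ ¬ aWordStop s[i]! = true
    · rw [aScanWord_of_cont s i hi hw] at h ⊢
      exact aScanWord_stop s (i + 1) h
    · rw [aScanWord_of_stop s i hi hw] at h ⊢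
      by_cases h1 : PySem.Chars.isspace s[i]! = true
      · exact Or.inl h1
      · right
        by_contra h2
        exact hw ⟨h1, h2⟩
  · rw [aScanWord_of_nil s i hi] at h
    exact absurd h hi
termination_by s.length - i

-- running B from string mode mirrors A's quote scan
theorem quoteRun (s : List Char) (j : Nat) (toks : List (List Char)) (buf : List Char)
    (hj : j ≤ s.length) :
    bFinish (List.foldl bStep (toks, BMode.instr, buf) (s.drop j)) =
      (if aScanQuote s j < s.length then
        bFinish (List.foldl bStep
          (toks ++ [buf ++ (s.drop j).take (aScanQuote s j + 1 - j)], BMode.norm, [])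
          (s.drop (aScanQuote s j + 1)))
      else toks ++ [buf ++ s.drop j]) := by
  by_cases hj' : j < s.length
  · have hd : s.drop j = s[j] :: s.drop (j + 1) := List.drop_eq_getElem_cons hj'
    have hbang : s[j]! = s[j] := getElem!_pos s j hj'
    by_cases hq : s[j]! = '\''
    · rw [getElem!_pos s j hj'] at hq
      rw [aScanQuote_of_stop s j hj' (by rw [hbang]; exact hq), if_pos hj', hd, List.foldl_cons]
      have hb : bStep (toks, BMode.instr, buf) s[j] = (toks ++ [buf ++ [s[j]]], BMode.norm, []) := by
        simp [bStep, hq]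
      rw [hb]
      simp only [show j + 1 - j = 1 by omega, List.take_succ_cons, List.take_zero]
    · rw [getElem!_pos s j hj'] at hq
      rw [aScanQuote_of_cont s j hj' (by rw [hbang]; exact hq)]
      have hk1 := le_aScanQuote s (j + 1)
      have hb : bStep (toks, BMode.instr, buf) s[j] = (toks, BMode.instr, buf ++ [s[j]]) := by
        simp [bStep, hq]
      rw [hd, List.foldl_cons, hb, quoteRun s (j + 1) toks (buf ++ [s[j]]) (by omega)]
      by_cases hk : aScanQuote s (j + 1) < s.length
      · rw [if_pos hk, if_pos hk]
        congr 3
        rw [show aScanQuote s (j + 1) + 1 - j = (aScanQuote s (j + 1) + 1 - (j + 1)) + 1 by omega,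
          List.take_succ_cons]
        simp
      · rw [if_neg hk, if_neg hk]
        simp
  · rw [aScanQuote_of_nil s j hj', if_neg hj', List.drop_eq_nil_of_le (by omega)]
    simp [bFinish]
termination_by s.length - j

-- running B in normal mode over a word prefix mirrors A's word scan
theorem wordRun (s : List Char) (i : Nat) (toks : List (List Char)) (buf : List Char) :
    List.foldl bStep (toks, BMode.norm, buf) (s.drop i) =
      List.foldl bStep (toks, BMode.norm, buf ++ (s.drop i).take (aScanWord s i - i))
        (s.drop (aScanWord s i)) := by
  by_cases hi : i < s.length
  · by_cases hw : ¬ PySem.Chars.isspace s[i]! = true ∧ ¬ aWordStop s[i]! = true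
    · have hd : s.drop i = s[i] :: s.drop (i + 1) := List.drop_eq_getElem_cons hi
      have hk1 := le_aScanWord s (i + 1)
      obtain ⟨hw1, hw2⟩ := hw
      rw [getElem!_pos s i hi] at hw1 hw2
      have hb : bStep (toks, BMode.norm, buf) s[i] = (toks, BMode.norm, buf ++ [s[i]]) := by
        simp only [aWordStop, Bool.or_eq_true, decide_eq_true_eq, not_or] at hw2
        simp [bStep, bStepNorm, hw1, hw2]
      rw [aScanWord_of_cont s i hi (by rw [getElem!_pos s i hi]; exact ⟨hw1, hw2⟩), hd,
        List.foldl_cons, hb, wordRun s (i + 1) toks (buf ++ [s[i]])]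
      congr 2
      rw [show aScanWord s (i + 1) - i = (aScanWord s (i + 1) - (i + 1)) + 1 by omega,
        List.take_succ_cons]
      simp
    · rw [aScanWord_of_stop s i hi hw]
      simp
  · rw [aScanWord_of_nil s i hi]
    simp
termination_by s.length - i

-- a non-word character first flushes the pending word buffer
theorem flush_step (toks : List (List Char)) (w : List Char) (c : Char)
    (hw : w ≠ [])
    (hc : PySem.Chars.isspace c = true ∨ aWordStop c = true) :
    bStep (toks, BMode.norm, w) c = bStep (toks ++ [w], BMode.norm, []) c := by
  simp only [bStep, bStepNorm, bFlush, if_neg hw]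
  split_ifs <;> simp_all [aWordStop]

theorem bStep_norm_quote (toks : List (List Char)) (buf : List Char) :
    bStep (toks, BMode.norm, buf) '\'' = (bFlush toks buf, BMode.instr, ['\'']) := by
  simp [bStep, bStepNorm]

theorem bStep_norm_punct (toks : List (List Char)) (c : Char) (hq : ¬ c = '\'')
    (hs : ¬ PySem.Chars.isspace c = true)
    (hp : (c = '(' || c = ')' || c = ',' || c = ';' || c = '*' || c = '=') = true) :
    bStep (toks, BMode.norm, []) c = (toks ++ [[c]], BMode.norm, []) := by
  simp [bStep, bStepNorm, bFlush, hq, hs, hp]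

theorem bStep_norm_angle (toks : List (List Char)) (c : Char) (hq : ¬ c = '\'')
    (hs : PySem.Chars.isspace c = false)
    (hp : (c = '(' || c = ')' || c = ',' || c = ';' || c = '*' || c = '=') = false)
    (ha : (c = '<' || c = '>') = true) :
    bStep (toks, BMode.norm, []) c = (toks, BMode.pend c, []) := by
  simp [bStep, bStepNorm, bFlush, hq, hs, hp, ha]

theorem bStep_norm_word (toks : List (List Char)) (buf : List Char) (c : Char)
    (hq : ¬ c = '\'') (hs : PySem.Chars.isspace c = false)
    (hp : (c = '(' || c = ')' || c = ',' || c = ';' || c = '*' || c = '=') = false)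
    (ha : (c = '<' || c = '>') = false) :
    bStep (toks, BMode.norm, buf) c = (toks, BMode.norm, buf ++ [c]) := by
  simp [bStep, bStepNorm, hq, hs, hp, ha]

theorem main_loop (n : Nat) (s : List Char) (i : Nat) (toks : List (List Char))
    (hn : s.length - i ≤ n) :
    aLoop s i toks = bFinish (List.foldl bStep (toks, BMode.norm, []) (s.drop i)) := by
  induction n generalizing i toks with
  | zero =>
    rw [aLoop_of_le s i toks (by omega), List.drop_eq_nil_of_le (by omega)]
    simp [bFinish, bFlush]
  | succ n ih =>
    by_cases h : i < s.length
    · have hd : s.drop i = s[i] :: s.drop (i + 1) := List.drop_eq_getElem_cons h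
      have hbang : s[i]! = s[i] := getElem!_pos s i h
      rw [aLoop]
      rw [dif_pos h]
      by_cases hws : PySem.Chars.isspace s[i]! = true
      · -- whitespace
        rw [dif_pos hws]
        rw [hbang] at hws
        have hb : bStep (toks, BMode.norm, []) s[i] = (toks, BMode.norm, []) := by
          have hq : ¬ s[i] = '\'' := by
            intro he
            rw [he] at hws
            simp [PySem.Chars.isspace] at hws
          simp [bStep, bStepNorm, bFlush, hq, hws]
        rw [hd, List.foldl_cons, hb, ih (i + 1) toks (by omega)]
      · rw [dif_neg hws]
        by_cases hN : s[i]! = 'N' ∧ i + 1 < s.length ∧ s[i + 1]! = '\''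
        · -- N'...' pattern
          rw [dif_pos hN]
          obtain ⟨hN1, hN2, hN3⟩ := hN
          rw [hbang] at hN1
          have hbang2 : s[i + 1]! = s[i + 1] := getElem!_pos s (i + 1) hN2
          rw [hbang2] at hN3
          have hd1 : s.drop (i + 1) = s[i + 1] :: s.drop (i + 2) := List.drop_eq_getElem_cons hN2
          have hk1 := le_aScanQuote s (i + 2)
          have hkle := aScanQuote_le s (i + 2) (by omega)
          show aLoop s (aScanQuote s (i + 2) + 1)
              (toks ++ [['N']] ++ [(s.drop (i + 1)).take (aScanQuote s (i + 2) + 1 - (i + 1))]) = _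
          conv_rhs => rw [hd, List.foldl_cons]
          rw [hN1, bStep_norm_word toks [] 'N' (by decide) (by decide) (by decide) (by decide),
            List.nil_append]
          conv_rhs => rw [hd1, List.foldl_cons]
          rw [hN3, bStep_norm_quote toks ['N'], show bFlush toks ['N'] = toks ++ [['N']] by simp [bFlush]]
          rw [quoteRun s (i + 2) (toks ++ [['N']]) ['\''] (by omega)]
          by_cases hk : aScanQuote s (i + 2) < s.length
          · rw [if_pos hk, ← ih (aScanQuote s (i + 2) + 1) _ (by omega)]
            congr 2
            rw [hd1, hN3, show aScanQuote s (i + 2) + 1 - (i + 1) = (aScanQuote s (i + 2) + 1 - (i + 2)) + 1 by omega,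
              List.take_succ_cons]
            rfl
          · rw [if_neg hk, aLoop_of_le s _ _ (by omega)]
            congr 2
            rw [List.take_of_length_le (by simp; omega), hd1, hN3]
            rfl
        · rw [dif_neg hN]
          by_cases hq : s[i]! = '\''
          · -- string literal
            rw [dif_pos hq]
            rw [hbang] at hq
            have hk1 := le_aScanQuote s (i + 1)
            have hkle := aScanQuote_le s (i + 1) (by omega)
            show aLoop s (aScanQuote s (i + 1) + 1)
                (toks ++ [(s.drop i).take (aScanQuote s (i + 1) + 1 - i)]) = _
            conv_rhs => rw [hd, List.foldl_cons]
            rw [hq, bStep_norm_quote toks [], show bFlush toks [] = toks by simp [bFlush]]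
            rw [quoteRun s (i + 1) toks ['\''] (by omega)]
            by_cases hk : aScanQuote s (i + 1) < s.length
            · rw [if_pos hk, ← ih (aScanQuote s (i + 1) + 1) _ (by omega)]
              congr 2
              rw [hd, hq, show aScanQuote s (i + 1) + 1 - i = (aScanQuote s (i + 1) + 1 - (i + 1)) + 1 by omega,
                List.take_succ_cons]
              rfl
            · rw [if_neg hk, aLoop_of_le s _ _ (by omega)]
              congr 2
              rw [List.take_of_length_le (by simp; omega), hd, hq]
              rfl
          · rw [dif_neg hq]
            rw [hbang] at hq
            by_cases hp : (decide (s[i]! = '(') || decide (s[i]! = ')') || decide (s[i]! = ',') ||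
                decide (s[i]! = ';') || decide (s[i]! = '*')) = true
            · -- single-char punctuation
              rw [dif_pos hp]
              rw [hbang] at hp
              simp only [Bool.or_eq_true, decide_eq_true_eq] at hp
              have hp6 : (s[i] = '(' || s[i] = ')' || s[i] = ',' || s[i] = ';' || s[i] = '*' ||
                  s[i] = '=') = true := by
                rcases hp with ((((h'|h')|h')|h')|h') <;> simp [h']
              rw [hbang, hd, List.foldl_cons,
                bStep_norm_punct toks s[i] hq (by rw [← hbang]; exact hws) hp6,
                ih (i + 1) _ (by omega)]
            · rw [dif_neg hp]
              by_cases h2 : i + 1 < s.length ∧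
                  ([s[i]!, s[i + 1]!] = ['<', '='] ∨ [s[i]!, s[i + 1]!] = ['>', '='] ∨
                   [s[i]!, s[i + 1]!] = ['<', '>'])
              · -- two-char operator
                rw [dif_pos h2]
                obtain ⟨h2a, h2b⟩ := h2
                have hbang2 : s[i + 1]! = s[i + 1] := getElem!_pos s (i + 1) h2a
                have hd1 : s.drop (i + 1) = s[i + 1] :: s.drop (i + 2) := List.drop_eq_getElem_cons h2a
                rw [hbang, hbang2] at h2b ⊢
                conv_rhs => rw [hd, List.foldl_cons, hd1, List.foldl_cons]
                have hsteps : bStep (bStep (toks, BMode.norm, []) s[i]) s[i + 1] =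
                    (toks ++ [[s[i], s[i + 1]]], BMode.norm, []) := by
                  rcases h2b with h'|h'|h' <;>
                    (simp only [List.cons.injEq, and_true] at h'
                     obtain ⟨e1, e2⟩ := h'
                     rw [e1, e2, bStep_norm_angle toks _ (by decide) (by decide) (by decide) (by decide)]
                     simp only [bStep]
                     rw [if_pos (by decide)])
                rw [hsteps, ih (i + 2) (toks ++ [[s[i], s[i + 1]]]) (by omega)]
              · rw [dif_neg h2]
                by_cases hop : (decide (s[i]! = '=') || decide (s[i]! = '<') || decide (s[i]! = '>')) = true
                · -- single-char operator
                  rw [dif_pos hop]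
                  rw [hbang] at hop ⊢
                  simp only [Bool.or_eq_true, decide_eq_true_eq] at hop
                  by_cases h' : s[i] = '='
                  · have hp6 : (s[i] = '(' || s[i] = ')' || s[i] = ',' || s[i] = ';' || s[i] = '*' ||
                        s[i] = '=') = true := by simp [h']
                    rw [hd, List.foldl_cons,
                      bStep_norm_punct toks s[i] hq (by rw [← hbang]; exact hws) hp6,
                      ih (i + 1) _ (by omega)]
                  · have hor : s[i] = '<' ∨ s[i] = '>' := by tauto
                    rw [hd, List.foldl_cons,
                      bStep_norm_angle toks s[i] hq (by rcases hor with e|e <;> rw [e] <;> decide)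
                        (by rcases hor with e|e <;> rw [e] <;> decide)
                        (by rcases hor with e|e <;> rw [e] <;> decide)]
                    by_cases hnext : i + 1 < s.length
                    · have hbang2 : s[i + 1]! = s[i + 1] := getElem!_pos s (i + 1) hnext
                      have hd1 : s.drop (i + 1) = s[i + 1] :: s.drop (i + 2) := List.drop_eq_getElem_cons hnext
                      have hnc : ¬ ((s[i] = '<' ∧ (s[i + 1] = '=' ∨ s[i + 1] = '>')) ∨
                          (s[i] = '>' ∧ s[i + 1] = '=')) := by
                        intro hcomb
                        apply h2
                        refine ⟨hnext, ?_⟩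
                        rw [hbang, hbang2]
                        rcases hcomb with ⟨e1, e2|e2⟩ | ⟨e1, e2⟩
                        · left; rw [e1, e2]
                        · right; right; rw [e1, e2]
                        · right; left; rw [e1, e2]
                      have hstep : bStep (toks, BMode.pend s[i], []) s[i + 1] =
                          bStep (toks ++ [[s[i]]], BMode.norm, []) s[i + 1] := by
                        simp only [bStep]
                        rw [if_neg hnc]
                      rw [hd1, List.foldl_cons, hstep, ← List.foldl_cons, ← hd1,
                        ih (i + 1) _ (by omega)]
                    · rw [show s.drop (i + 1) = [] from List.drop_eq_nil_of_le (by omega),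
                        List.foldl_nil, aLoop_of_le s _ _ (by omega)]
                      simp [bFinish]
                · -- word/identifier
                  rw [dif_neg hop]
                  have hstopc : ¬ aWordStop s[i]! = true := by
                    simp only [Bool.or_eq_true, decide_eq_true_eq, not_or, hbang] at hp hop
                    simp only [aWordStop, Bool.or_eq_true, decide_eq_true_eq, not_or, hbang]
                    tauto
                  have hj1 : i + 1 ≤ aScanWord s i := aScanWord_advance s i h hws hstopc
                  have hjle : aScanWord s i ≤ s.length := aScanWord_le s i (by omega)
                  show aLoop s (aScanWord s i)
                      (if i < aScanWord s i then toks ++ [(s.drop i).take (aScanWord s i - i)]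
                       else toks) = _
                  rw [if_pos (by omega)]
                  have hwne : (s.drop i).take (aScanWord s i - i) ≠ [] := by
                    apply List.ne_nil_of_length_pos
                    simp only [List.length_take, List.length_drop]
                    omega
                  conv_rhs => rw [wordRun s i toks []]
                  rw [List.nil_append]
                  by_cases hjl : aScanWord s i < s.length
                  · have hstop := aScanWord_stop s i hjl
                    rw [getElem!_pos s (aScanWord s i) hjl] at hstop
                    have hdj : s.drop (aScanWord s i) = s[aScanWord s i] :: s.drop (aScanWord s i + 1) :=
                      List.drop_eq_getElem_cons hjl
                    conv_rhs => rw [hdj, List.foldl_cons]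
                    rw [flush_step toks _ _ hwne hstop,
                      ← List.foldl_cons, ← hdj, ih (aScanWord s i) _ (by omega)]
                  · rw [show s.drop (aScanWord s i) = [] from List.drop_eq_nil_of_le (by omega),
                      List.foldl_nil, aLoop_of_le s _ _ (by omega)]
                    simp [bFinish, bFlush, hwne]
    · rw [aLoop_of_le s i toks (by omega), List.drop_eq_nil_of_le (by omega)]
      simp [bFinish, bFlush]

-- ===== VERDICT (by name: the statement is the Claim_ definition above) =====
theorem rebuild_query_toks_spec : Claim_equal_rebuild_query_toks := by
  intro query _
  unfold Spec_rebuild_query_toks rebuild_query_toks rebuild_query_toks_alt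
  have := main_loop (PySem.Chars.strip query.toList).length (PySem.Chars.strip query.toList) 0 [] (by omega)
  simp only [List.drop_zero] at this
  rw [this]
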